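-- pv_equiv track=rewrite | github.com/borosabel/PopMusicInformationRetrieval | Emotion Analysis/utility_functions.py | process_context
-- ===== SOURCE A (Python) =====
-- def process_context(tokens):
--     processed_tokens = []
--     negate_next = False
--
--     for i, token in enumerate(tokens):
--         if token in ["not", "never", "don't", "can't"]:
--             negate_next = True
--         elif negate_next:
--             processed_tokens.append(f"not_{token}")  # Append with "not_" prefix to indicate negation
--             negate_next = False
--         else:
--             processed_tokens.append(token)
--     return processed_tokens
-- ===== SOURCE B (Python) =====
-- def process_context(tokens):
--     processed_tokens = []
--     it = iter(tokens)
--     for token in it: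
--         if token in ("not", "never", "don't", "can't"):
--             for nxt in it:
--                 if nxt not in ("not", "never", "don't", "can't"):
--                     processed_tokens.append("not_" + nxt)
--                     break
--         else:
--             processed_tokens.append(token)
--     return processed_tokens
-- ===== Notes on version B (the rewrite author's own statement) =====
-- stated objective: alternative
-- what changed: Replaces the persisted negate_next flag with iterator lookahead: on a negation word a nested loop consumes following negation words and emits the first non-negation token with a 'not_' prefix.
import Mathlib
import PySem

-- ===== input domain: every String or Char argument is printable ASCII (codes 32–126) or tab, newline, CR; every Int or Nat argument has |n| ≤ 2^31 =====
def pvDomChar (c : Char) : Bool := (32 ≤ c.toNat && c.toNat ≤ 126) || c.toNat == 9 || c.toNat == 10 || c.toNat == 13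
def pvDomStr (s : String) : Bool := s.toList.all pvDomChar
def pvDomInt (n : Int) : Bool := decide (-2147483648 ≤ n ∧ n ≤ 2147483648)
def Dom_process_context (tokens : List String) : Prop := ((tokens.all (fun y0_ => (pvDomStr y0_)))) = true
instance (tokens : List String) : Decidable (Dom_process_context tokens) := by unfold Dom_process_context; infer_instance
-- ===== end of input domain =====

-- B replaces A's persisted negate_next flag with iterator lookahead (nested loop consuming negation words); alternative decomposition, same cost.


-- ===== PORT A =====
def pvNegWords : List String := ["not", "never", "don't", "can't"]

-- literal transliteration of A: one pass carrying (processed_tokens, negate_next)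
def process_context (tokens : List String) : List String :=
  (tokens.foldl
    (fun (st : List String × Bool) token =>
      if token ∈ pvNegWords then (st.1, true)
      else if st.2 then (st.1 ++ ["not_" ++ token], false)
      else (st.1 ++ [token], false))
    ([], false)).1

-- ===== PORT B =====
-- transliteration of B: outer loop over the iterator; on a negation word a nested
-- loop (pcSkip) consumes the rest of the iterator until the first non-negation token.
mutual
def pcGo : List String → List String
  | [] => []
  | t :: rest => if t ∈ pvNegWords then pcSkip rest else t :: pcGo rest
def pcSkip : List String → List String
  | [] => []
  | t :: rest => if t ∈ pvNegWords then pcSkip rest else ("not_" ++ t) :: pcGo rest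
end

def process_context_alt (tokens : List String) : List String := pcGo tokens

-- ===== PRECONDITION & SPEC =====
def Spec_process_context (tokens : List String) (out : List String) : Prop := out = process_context_alt tokens
instance (tokens : List String) (out : List String) : Decidable (Spec_process_context tokens out) := by unfold Spec_process_context; infer_instance

-- ===== CLAIM (what is proved, stated in full; the proofs are below) =====
def Claim_equal_process_context : Prop := ∀ (tokens : List String), Dom_process_context tokens → Spec_process_context tokens (process_context tokens)

-- ===== LEMMAS AND PROOFS =====
theorem pc_fold_eq (tokens : List String) :
    ∀ (acc : List String) (flag : Bool),
      (tokens.foldl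
        (fun (st : List String × Bool) token =>
          if token ∈ pvNegWords then (st.1, true)
          else if st.2 then (st.1 ++ ["not_" ++ token], false)
          else (st.1 ++ [token], false))
        (acc, flag)).1 = acc ++ (if flag then pcSkip tokens else pcGo tokens) := by
  induction tokens with
  | nil => intro acc flag; cases flag <;> simp [pcGo, pcSkip]
  | cons t rest ih =>
    intro acc flag
    by_cases hn : t ∈ pvNegWords
    · cases flag <;> simp [List.foldl, hn, ih, pcGo, pcSkip]
    · cases flag <;> simp [List.foldl, hn, ih, pcGo, pcSkip]

-- ===== VERDICT (by name: the statement is the Claim_ definition above) =====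
theorem process_context_spec : Claim_equal_process_context := by
  intro tokens _
  unfold Spec_process_context process_context process_context_alt
  simpa using pc_fold_eq tokens [] false
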